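-- pv_equiv track=rewrite | github.com/markzhdan/cv-photoapp | FINAL.py | associate_hands
-- ===== SOURCE A (Python) =====
-- import math
--
-- def euclidean_distance(pt1, pt2):
--     return math.sqrt((pt1[0] - pt2[0]) ** 2 + (pt1[1] - pt2[1]) ** 2)
--
-- def associate_hands(hand_centroids, face_centroids, threshold):
--     hand_face_associations = []
--     for hand in hand_centroids:
--         closest_face = None
--         min_distance = float("inf")
--         for face in face_centroids:
--             distance = euclidean_distance(hand, face)
--             if distance < min_distance and distance < threshold:
--                 min_distance = distance
--                 closest_face = face
--         if closest_face:
--             hand_face_associations.append((hand, closest_face))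
--     return hand_face_associations
-- ===== SOURCE B (Python) =====
-- import math
--
-- def euclidean_distance(pt1, pt2):
--     return math.sqrt((pt1[0] - pt2[0]) ** 2 + (pt1[1] - pt2[1]) ** 2)
--
-- def associate_hands(hand_centroids, face_centroids, threshold):
--     out = []
--     for hand in hand_centroids:
--         faces_by_distance = sorted(face_centroids,
--                                    key=lambda face: euclidean_distance(hand, face))
--         if faces_by_distance and euclidean_distance(hand, faces_by_distance[0]) < threshold:
--             out.append((hand, faces_by_distance[0]))
--     return out
-- ===== Notes on version B (the rewrite author's own statement) =====
-- stated objective: alternative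
-- what changed: B replaces A's threshold-filtered strict-min scan over faces by a stable sort of the faces by distance per hand, then a single threshold test on the sorted head (stability preserves A's first-of-ties choice).
import Mathlib
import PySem

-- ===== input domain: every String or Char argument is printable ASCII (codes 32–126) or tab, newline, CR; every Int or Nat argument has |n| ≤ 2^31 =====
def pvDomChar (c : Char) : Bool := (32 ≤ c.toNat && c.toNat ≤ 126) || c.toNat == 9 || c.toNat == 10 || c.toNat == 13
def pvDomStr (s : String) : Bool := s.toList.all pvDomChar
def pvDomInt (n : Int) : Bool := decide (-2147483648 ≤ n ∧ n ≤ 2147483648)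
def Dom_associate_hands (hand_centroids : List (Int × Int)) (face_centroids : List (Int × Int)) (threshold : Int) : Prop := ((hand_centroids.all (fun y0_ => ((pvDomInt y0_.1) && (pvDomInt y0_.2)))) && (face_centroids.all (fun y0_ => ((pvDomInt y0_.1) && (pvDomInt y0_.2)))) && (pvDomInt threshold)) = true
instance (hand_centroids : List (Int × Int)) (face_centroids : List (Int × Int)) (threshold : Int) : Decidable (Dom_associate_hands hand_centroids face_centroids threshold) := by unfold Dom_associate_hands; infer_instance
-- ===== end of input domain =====

-- B replaces A's threshold-filtered min-scan by a stable sort of the faces by distance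
-- followed by a single threshold test on the head (objective: alternative decomposition).

-- ===== PORT A =====
-- Shared module helper `euclidean_distance` uses math.sqrt, a binary64 float.
-- We model its exact value as a rational: CPython converts the int argument to the
-- nearest double (ties to even) and then takes the correctly rounded IEEE-754 sqrt;
-- both steps are reproduced exactly below (validated against CPython on the domain).

-- nearest double to a nonnegative integer (ties to even), returned as an exact integer
def dblRoundNat (n : Nat) : Nat :=
  if n < 2 ^ 53 then n
  else
    let t := (Nat.log2 n + 1) - 53
    let q := n / 2 ^ t
    let r := n % 2 ^ t
    let half := 2 ^ (t - 1)
    let q' := if r < half then q else if half < r then q + 1 else if q % 2 = 0 then q else q + 1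
    q' * 2 ^ t

-- exact rational value of the double math.sqrt(n) for a nonnegative integer n
def fsqrtQ (n : Nat) : ℚ :=
  if n = 0 then 0
  else
    let N0 := dblRoundNat n
    let L := Nat.log2 N0 + 1
    let twos := if L % 2 = 0 then 106 - L else 105 - L
    let N := N0 * 2 ^ twos
    let s0 := Nat.sqrt N
    let m := if N ≤ s0 * s0 + s0 then s0 else s0 + 1
    (m : ℚ) / ((2 : ℚ) ^ (twos / 2))

-- euclidean_distance(pt1, pt2) — exact value of the float it returns
def euclidean_distance (pt1 pt2 : Int × Int) : ℚ :=
  fsqrtQ (((pt1.1 - pt2.1) ^ 2 + (pt1.2 - pt2.2) ^ 2).toNat)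

-- `distance < min_distance` where min_distance starts as float("inf") (modelled as none)
def ltInf (d : ℚ) (m : Option ℚ) : Bool :=
  match m with
  | none => true
  | some v => decide (d < v)

-- inner loop of A: scan faces keeping (closest_face, min_distance)
def aScan (hand : Int × Int) (faces : List (Int × Int)) (threshold : Int) :
    Option (Int × Int) × Option ℚ :=
  faces.foldl
    (fun st face =>
      let distance := euclidean_distance hand face
      if ltInf distance st.2 && decide (distance < (threshold : ℚ)) then (some face, some distance)
      else st)
    (none, none)

-- `if closest_face:` — a face is a 2-tuple, hence always truthy; the guard is isSome
def associate_hands (hand_centroids : List (Int × Int)) (face_centroids : List (Int × Int)) (threshold : Int) : List ((Int × Int) × (Int × Int)) :=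
  hand_centroids.foldl
    (fun acc hand =>
      match (aScan hand face_centroids threshold).1 with
      | some closest_face => acc ++ [(hand, closest_face)]
      | none => acc)
    []

-- ===== PORT B =====
def associate_hands_alt (hand_centroids : List (Int × Int)) (face_centroids : List (Int × Int)) (threshold : Int) : List ((Int × Int) × (Int × Int)) :=
  hand_centroids.foldl
    (fun acc hand =>
      let faces_by_distance :=
        PySem.List.sorted face_centroids (fun face => euclidean_distance hand face) false
      match faces_by_distance with
      | [] => acc
      | f :: _ =>
        if euclidean_distance hand f < (threshold : ℚ) then acc ++ [(hand, f)] else acc)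
    []

-- ===== PRECONDITION & SPEC =====
def Spec_associate_hands (hand_centroids : List (Int × Int)) (face_centroids : List (Int × Int)) (threshold : Int) (out : List ((Int × Int) × (Int × Int))) : Prop := out = associate_hands_alt hand_centroids face_centroids threshold
instance (hand_centroids : List (Int × Int)) (face_centroids : List (Int × Int)) (threshold : Int) (out : List ((Int × Int) × (Int × Int))) : Decidable (Spec_associate_hands hand_centroids face_centroids threshold out) := by unfold Spec_associate_hands; infer_instance

-- ===== CLAIM (what is proved, stated in full; the proofs are below) =====
def Claim_equal_associate_hands : Prop := ∀ (hand_centroids : List (Int × Int)) (face_centroids : List (Int × Int)) (threshold : Int), Dom_associate_hands hand_centroids face_centroids threshold → Spec_associate_hands hand_centroids face_centroids threshold (associate_hands hand_centroids face_centroids threshold)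

-- ===== LEMMAS AND PROOFS =====

-- head of an insertion step
theorem head?_insertBy (key : (Int × Int) → ℚ) (x : Int × Int) (l : List (Int × Int)) :
    (PySem.List.insertBy (fun a b => decide (key a < key b)) x l).head? =
      match l.head? with
      | none => some x
      | some h => if key x < key h then some x else some h := by
  cases l with
  | nil => rfl
  | cons y ys =>
    simp only [PySem.List.insertBy, List.head?_cons]
    by_cases h : key x < key y <;> simp [h]

theorem head?_foldl_insertBy (key : (Int × Int) → ℚ) :
    ∀ (xs : List (Int × Int)) (acc : List (Int × Int)) (o : Option (Int × Int)),
      acc.head? = o →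
      (List.foldl (fun acc x => PySem.List.insertBy (fun a b => decide (key a < key b)) x acc) acc xs).head? =
        xs.foldl
          (fun o f => match o with
            | none => some f
            | some g => if key f < key g then some f else some g) o := by
  intro xs
  induction xs with
  | nil => intro acc o h; simpa using h
  | cons x tl ih =>
    intro acc o h
    simp only [List.foldl_cons]
    apply ih
    rw [head?_insertBy, h]

-- head of Python's stable sort = first minimum of the left scan
theorem head?_sorted (key : (Int × Int) → ℚ) (xs : List (Int × Int)) :
    (PySem.List.sorted xs key false).head? =
      xs.foldl
        (fun o f => match o with
          | none => some f
          | some g => if key f < key g then some f else some g) none := by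
  rw [PySem.List.sorted_eq_foldl_insertBy]
  exact head?_foldl_insertBy key xs [] none rfl

-- invariant tying A's scan state to the unfiltered first-minimum scan
def ARel (key : (Int × Int) → ℚ) (t : ℚ) (o : Option (Int × Int))
    (st : Option (Int × Int) × Option ℚ) : Prop :=
  (o = none ∧ st = (none, none)) ∨
  (∃ g, o = some g ∧
    ((key g < t ∧ st = (some g, some (key g))) ∨ (¬ key g < t ∧ st = (none, none))))

theorem aRel_fold (key : (Int × Int) → ℚ) (t : ℚ) :
    ∀ (xs : List (Int × Int)) (o : Option (Int × Int)) (st : Option (Int × Int) × Option ℚ),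
      ARel key t o st →
      ARel key t
        (xs.foldl
          (fun o f => match o with
            | none => some f
            | some g => if key f < key g then some f else some g) o)
        (xs.foldl
          (fun st face =>
            if ltInf (key face) st.2 && decide (key face < t) then (some face, some (key face))
            else st) st) := by
  intro xs
  induction xs with
  | nil => intro o st h; exact h
  | cons f tl ih =>
    intro o st h
    simp only [List.foldl_cons]
    apply ih
    rcases h with ⟨ho, hst⟩ | ⟨g, ho, ⟨hg, hst⟩ | ⟨hg, hst⟩⟩
    · subst ho; subst hst
      by_cases hf : key f < t
      · exact Or.inr ⟨f, rfl, Or.inl ⟨hf, by simp [ltInf, hf]⟩⟩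
      · exact Or.inr ⟨f, rfl, Or.inr ⟨hf, by simp [ltInf, hf]⟩⟩
    · subst ho; subst hst
      by_cases hf : key f < key g
      · have hft : key f < t := lt_trans hf hg
        exact Or.inr ⟨f, by simp [hf], Or.inl ⟨hft, by simp [ltInf, hf, hft]⟩⟩
      · exact Or.inr ⟨g, by simp [hf], Or.inl ⟨hg, by simp [ltInf, hf]⟩⟩
    · subst ho; subst hst
      by_cases hf : key f < key g
      · by_cases hft : key f < t
        · exact Or.inr ⟨f, by simp [hf], Or.inl ⟨hft, by simp [ltInf, hft]⟩⟩
        · exact Or.inr ⟨f, by simp [hf], Or.inr ⟨hft, by simp [ltInf, hft]⟩⟩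
      · have hft : ¬ key f < t := fun hlt => hg (lt_of_le_of_lt (le_of_not_gt hf) hlt)
        exact Or.inr ⟨g, by simp [hf], Or.inr ⟨hg, by simp [ltInf, hft]⟩⟩

-- per-hand: A's filtered min-scan result = threshold test on the sorted head
theorem scan_eq_sorted_head (hand : Int × Int) (faces : List (Int × Int)) (threshold : Int) :
    (aScan hand faces threshold).1 =
      match (PySem.List.sorted faces (fun face => euclidean_distance hand face) false).head? with
      | none => none
      | some f => if euclidean_distance hand f < (threshold : ℚ) then some f else none := by
  have h := aRel_fold (fun face => euclidean_distance hand face) (threshold : ℚ) faces none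
    (none, none) (Or.inl ⟨rfl, rfl⟩)
  rw [head?_sorted]
  have : aScan hand faces threshold =
      faces.foldl
        (fun st face =>
          if ltInf (euclidean_distance hand face) st.2 &&
              decide (euclidean_distance hand face < (threshold : ℚ)) then
            (some face, some (euclidean_distance hand face))
          else st) (none, none) := rfl
  rw [this]
  rcases h with ⟨ho, hst⟩ | ⟨g, ho, ⟨hg, hst⟩ | ⟨hg, hst⟩⟩
  · rw [hst]; rw [ho]
  · rw [hst]; rw [ho]; simp [hg]
  · rw [hst]; rw [ho]; simp [hg]


-- ===== VERDICT (by name: the statement is the Claim_ definition above) =====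
theorem associate_hands_spec : Claim_equal_associate_hands := by
  intro hand_centroids face_centroids threshold _
  unfold Spec_associate_hands associate_hands associate_hands_alt
  apply List.foldl_ext
  intro acc hand _
  show (match (aScan hand face_centroids threshold).1 with
        | some closest_face => acc ++ [(hand, closest_face)]
        | none => acc) =
      (match PySem.List.sorted face_centroids (fun face => euclidean_distance hand face) false with
        | [] => acc
        | f :: _ =>
          if euclidean_distance hand f < (threshold : ℚ) then acc ++ [(hand, f)] else acc)
  rw [scan_eq_sorted_head]
  cases PySem.List.sorted face_centroids (fun face => euclidean_distance hand face) false with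
  | nil => rfl
  | cons f t =>
    simp only [List.head?_cons]
    by_cases hf : euclidean_distance hand f < (threshold : ℚ) <;> simp [hf]
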